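-- pv_equiv track=rewrite | github.com/hgparker/project_euler | Problem65a.py | getConvergentNumerator
-- ===== SOURCE A (Python) =====
-- def getPCFe(k):
--   if k % 3 != 2:
--     return 1
--   else:
--     return 2 * (k+1) // 3
--
-- def getConvergentNumerator(k):
--   aPenult = 1
--   aUlt = 2
--
--   for k in range(1, k):
--     aNew = getPCFe(k) * aUlt + aPenult
--     aPenult = aUlt
--     aUlt = aNew
--
--   return aUlt
-- ===== SOURCE B (Python) =====
-- def getConvergentNumerator(k):
--     # Materialize the partial quotients [a0=2, a1, ..., a_{k-1}] of e, then
--     # evaluate the continued fraction as a nested fraction from the innermost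
--     # term outward (back-to-front), returning the resulting numerator.
--     qs = [2] + [2 * (i + 1) // 3 if i % 3 == 2 else 1 for i in range(1, k)]
--     n, d = 1, 0
--     for q in reversed(qs):
--         n, d = q * n + d, n
--     return n
-- ===== Notes on version B (the rewrite author's own statement) =====
-- stated objective: alternative
-- what changed: Instead of running the forward two-term numerator recurrence, B materializes the list of partial quotients and evaluates the continued fraction back-to-front (innermost term outward) with a numerator/denominator accumulator; equality is the continuant palindrome identity.
import Mathlib
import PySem

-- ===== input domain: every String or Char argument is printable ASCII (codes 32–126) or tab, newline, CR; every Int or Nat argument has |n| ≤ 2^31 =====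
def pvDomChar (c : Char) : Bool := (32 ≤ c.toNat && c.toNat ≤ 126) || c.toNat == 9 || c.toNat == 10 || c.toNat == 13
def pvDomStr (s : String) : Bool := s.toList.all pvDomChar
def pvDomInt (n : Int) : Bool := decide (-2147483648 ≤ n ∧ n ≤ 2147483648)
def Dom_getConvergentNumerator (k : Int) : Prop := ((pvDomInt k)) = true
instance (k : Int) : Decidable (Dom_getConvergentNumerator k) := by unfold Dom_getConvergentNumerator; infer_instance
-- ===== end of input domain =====

-- B materializes the partial-quotient list and evaluates the continued fraction
-- back-to-front (nested-fraction accumulator) instead of A's forward recurrence;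
-- alternative algorithm, same cost.


-- ===== PORT A =====
def getPCFe (k : Int) : Int :=
  if PySem.Int.mod k 3 ≠ 2 then 1 else PySem.Int.floordiv (2 * (k + 1)) 3

def getConvergentNumerator (k : Int) : Int :=
  ((PySem.List.pyRange 1 k 1).foldl
    (fun (s : Int × Int) i => (s.2, getPCFe i * s.2 + s.1)) (1, 2)).2

-- ===== PORT B =====
def getConvergentNumerator_alt (k : Int) : Int :=
  let qs : List Int := 2 ::
    (PySem.List.pyRange 1 k 1).map
      (fun i => if PySem.Int.mod i 3 == 2 then PySem.Int.floordiv (2 * (i + 1)) 3 else 1)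
  (qs.reverse.foldl (fun (s : Int × Int) q => (q * s.1 + s.2, s.1)) (1, 0)).1

-- ===== PRECONDITION & SPEC =====
def Spec_getConvergentNumerator (k : Int) (out : Int) : Prop := out = getConvergentNumerator_alt k
instance (k : Int) (out : Int) : Decidable (Spec_getConvergentNumerator k out) := by unfold Spec_getConvergentNumerator; infer_instance

-- ===== CLAIM (what is proved, stated in full; the proofs are below) =====
def Claim_equal_getConvergentNumerator : Prop := ∀ (k : Int), Dom_getConvergentNumerator k → Spec_getConvergentNumerator k (getConvergentNumerator k)

-- ===== LEMMAS AND PROOFS =====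
-- Backward (foldr) numerator/denominator pair of a quotient list.
def pvND (l : List Int) : Int × Int :=
  l.foldr (fun q s => (q * s.1 + s.2, s.1)) (1, 0)

-- Continuant symmetry: the forward recurrence starting from (a, b) equals a
-- linear combination of the backward pair.
theorem pv_fwd_eq_bwd (l : List Int) (a b : Int) :
    ((l.foldl (fun (s : Int × Int) q => (s.2, q * s.2 + s.1)) (a, b)).2)
      = b * (pvND l).1 + a * (pvND l).2 := by
  induction l generalizing a b with
  | nil => simp [pvND]
  | cons q t ih =>
      simp only [List.foldl_cons, pvND, List.foldr_cons] at *
      rw [ih]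
      ring

-- The quotient formula B inlines agrees with getPCFe.
theorem pv_q_eq (i : Int) :
    (if PySem.Int.mod i 3 == 2 then PySem.Int.floordiv (2 * (i + 1)) 3 else 1) = getPCFe i := by
  unfold getPCFe
  by_cases h : PySem.Int.mod i 3 = 2
  · simp [h]
  · rw [if_neg (by simpa using h), if_pos h]

-- ===== VERDICT (by name: the statement is the Claim_ definition above) =====
theorem getConvergentNumerator_spec : Claim_equal_getConvergentNumerator := by
  intro k _
  unfold Spec_getConvergentNumerator getConvergentNumerator getConvergentNumerator_alt
  simp only [pv_q_eq, List.foldl_reverse]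
  -- B's reversed foldl is the foldr pair pvND over the full list 2 :: map getPCFe …
  rw [show ((2 :: (PySem.List.pyRange 1 k 1).map getPCFe).foldr
      (fun q s => (q * s.1 + s.2, s.1)) ((1 : Int), (0 : Int))).1
      = (pvND (2 :: (PySem.List.pyRange 1 k 1).map getPCFe)).1 from rfl]
  -- A's fold starting (1,2) is the fold over the 2-prefixed list starting (0,1)
  have hA : ((PySem.List.pyRange 1 k 1).foldl
      (fun (s : Int × Int) i => (s.2, getPCFe i * s.2 + s.1)) (1, 2)).2
      = (((2 :: (PySem.List.pyRange 1 k 1).map getPCFe).foldl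
          (fun (s : Int × Int) q => (s.2, q * s.2 + s.1)) (0, 1)).2) := by
    simp [List.foldl_map]
  rw [hA, pv_fwd_eq_bwd]
  ring
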